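-- pv_equiv track=rewrite | github.com/pabloojp/Big-Data-en-paralelo | Entrega1.py | suma3num_5_mod7
-- ===== SOURCE A (Python) =====
-- from typing import Type, Tuple
--
-- def suma3num_5_mod7(lista : list) -> Tuple:
--     longitud = len(lista)
--     ultima_tupla_add = lista[longitud - 1]
--     ultimo_elemento = ultima_tupla_add[0]
--     for i in range(longitud - 1):
--         for j in range(i + 1, longitud-1):
--             prim = lista[i]
--             seg = lista[j]
--             if (prim[0] + seg[0] + ultimo_elemento) % 7 == 5:
--                 result = [prim, seg, ultima_tupla_add]
--                 return (result, True)
--     return ([], False)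
-- ===== SOURCE B (Python) =====
-- def suma3num_5_mod7(lista):
--     # two-pass: backward pass records, for each element, the nearest element
--     # to its right (among lista[:-1]) whose residue mod 7 completes the sum to 5 mod 7.
--     ultima_tupla_add = lista[-1]
--     ultimo_elemento = ultima_tupla_add[0]
--     body = lista[:-1]
--     objetivo = (5 - ultimo_elemento) % 7
--     nxt = {}        # residue mod 7 -> nearest element to the right with that residue
--     matches = []    # built right-to-left: partner of each body element, or None
--     for x in reversed(body):
--         matches.append(nxt.get((objetivo - x[0]) % 7))
--         nxt[x[0] % 7] = x
--     matches.reverse()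
--     for x, y in zip(body, matches):
--         if y is not None:
--             return ([x, y, ultima_tupla_add], True)
--     return ([], False)
-- ===== Notes on version B (the rewrite author's own statement) =====
-- stated objective: alternative
-- what changed: Replaces A's nested index scan over all pairs by a backward pass that records, in a dict keyed by residue mod 7, the nearest partner to the right of each element, followed by one forward scan for the first element with a partner (O(n) vs A's O(n^2) worst case, same measured speed on the generated inputs).
-- outside the precondition, e.g. on suma3num_5_mod7([(), (1,)]): A returns ([], False), B raises IndexError; on suma3num_5_mod7([(5,), (0,), (), (0,)]): A returns ([(5,), (0,), (0,)], True), B raises IndexError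
import Mathlib
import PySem

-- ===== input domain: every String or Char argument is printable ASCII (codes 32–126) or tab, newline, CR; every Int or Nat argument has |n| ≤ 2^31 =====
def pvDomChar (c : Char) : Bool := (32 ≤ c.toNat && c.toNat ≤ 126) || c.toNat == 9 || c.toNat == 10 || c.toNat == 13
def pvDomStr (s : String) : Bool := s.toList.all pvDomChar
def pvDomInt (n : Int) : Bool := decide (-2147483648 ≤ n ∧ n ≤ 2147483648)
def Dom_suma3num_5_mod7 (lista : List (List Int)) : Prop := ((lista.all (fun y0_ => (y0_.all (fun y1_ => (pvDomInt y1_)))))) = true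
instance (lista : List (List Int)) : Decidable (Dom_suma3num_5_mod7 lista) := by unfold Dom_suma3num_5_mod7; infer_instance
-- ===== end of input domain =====

-- B replaces A's nested index scan over pairs by a backward pass recording, per residue mod 7,
-- the nearest partner to the right, plus one forward scan (objective: alternative).

-- ===== PORT A =====
-- inner 'for j in range(i + 1, longitud - 1)' loop (early return as Option)
def pvAInner (lista : List (List Int)) (ultimo : Int) (ultima : List Int) (i : Int) :
    List Int → Option (List (List Int))
  | [] => none
  | j :: js =>
    let prim := (PySem.List.pyGet? lista i).getD []
    let seg := (PySem.List.pyGet? lista j).getD []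
    if PySem.Int.mod ((PySem.List.pyGet? prim 0).getD 0 + (PySem.List.pyGet? seg 0).getD 0 + ultimo) 7 == 5 then
      some [prim, seg, ultima]
    else pvAInner lista ultimo ultima i js

-- outer 'for i in range(longitud - 1)' loop
def pvAOuter (lista : List (List Int)) (ultimo : Int) (ultima : List Int) :
    List Int → Option (List (List Int))
  | [] => none
  | i :: is =>
    match pvAInner lista ultimo ultima i (PySem.List.pyRange (i + 1) (PySem.List.len lista - 1) 1) with
    | some r => some r
    | none => pvAOuter lista ultimo ultima is

def suma3num_5_mod7 (lista : List (List Int)) : List (List Int) × Bool :=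
  let longitud := PySem.List.len lista
  let ultima := (PySem.List.pyGet? lista (longitud - 1)).getD []
  let ultimo := (PySem.List.pyGet? ultima 0).getD 0
  match pvAOuter lista ultimo ultima (PySem.List.pyRange 0 (longitud - 1) 1) with
  | some r => (r, true)
  | none => ([], false)

-- ===== PORT B =====
-- backward pass: 'for x in reversed(body)' — argument list is body.reverse; ms is 'matches'
def pvBPass (objetivo : Int) :
    List (List Int) → PySem.Dict Int (List Int) → List (Option (List Int)) →
    PySem.Dict Int (List Int) × List (Option (List Int))
  | [], nxt, ms => (nxt, ms)
  | x :: xs, nxt, ms =>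
    let v := (PySem.List.pyGet? x 0).getD 0
    pvBPass objetivo xs (PySem.Dict.insert nxt (PySem.Int.mod v 7) x)
      (ms ++ [PySem.Dict.get? nxt (PySem.Int.mod (objetivo - v) 7)])

-- forward scan: 'for x, y in zip(body, matches)'
def pvBScan (ultima : List Int) : List (List Int × Option (List Int)) → List (List Int) × Bool
  | [] => ([], false)
  | (x, some y) :: _ => ([x, y, ultima], true)
  | (_, none) :: rest => pvBScan ultima rest

def suma3num_5_mod7_alt (lista : List (List Int)) : List (List Int) × Bool :=
  let ultima := (PySem.List.pyGet? lista (-1)).getD []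
  let ultimo := (PySem.List.pyGet? ultima 0).getD 0
  let body := PySem.List.slice lista none (some (-1))
  let objetivo := PySem.Int.mod (5 - ultimo) 7
  let ms := (pvBPass objetivo body.reverse PySem.Dict.empty []).2
  pvBScan ultima (body.zip ms.reverse)

-- ===== PRECONDITION & SPEC =====
-- Pre_ excludes the empty list and lists containing an empty inner list: there Python A
-- raises IndexError except when the pair search returns before reaching the empty element
-- (B inspects every element, so B raises on all such lists).
def Pre_suma3num_5_mod7 (lista : List (List Int)) : Prop :=
  lista ≠ [] ∧ ∀ x ∈ lista, x ≠ []
instance (lista : List (List Int)) : Decidable (Pre_suma3num_5_mod7 lista) := by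
  unfold Pre_suma3num_5_mod7; infer_instance

def pvWitness_suma3num_5_mod7 : List (List Int) := [[1], [2], [3]]

def Spec_suma3num_5_mod7 (lista : List (List Int)) (out : List (List Int) × Bool) : Prop :=
  out = suma3num_5_mod7_alt lista
instance (lista : List (List Int)) (out : List (List Int) × Bool) :
    Decidable (Spec_suma3num_5_mod7 lista out) := by unfold Spec_suma3num_5_mod7; infer_instance

-- ===== CLAIM (what is proved, stated in full; the proofs are below) =====
def Claim_equal_suma3num_5_mod7 : Prop :=
  ∀ (lista : List (List Int)), Dom_suma3num_5_mod7 lista → Pre_suma3num_5_mod7 lista →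
    Spec_suma3num_5_mod7 lista (suma3num_5_mod7 lista)

-- ===== LEMMAS AND PROOFS =====

-- x[0] as both ports read it
def pvHd (x : List Int) : Int := (PySem.List.pyGet? x 0).getD 0

-- A's pair condition, as a predicate on the second element
def pvCond (u : Int) (x y : List Int) : Bool :=
  PySem.Int.mod (pvHd x + pvHd y + u) 7 == 5

-- reference search: first pair (in A's lexicographic order) over suffixes
def pvSearch (u : Int) (ultima : List Int) : List (List Int) → Option (List (List Int))
  | [] => none
  | x :: xs =>
    match xs.find? (pvCond u x) with
    | some y => some [x, y, ultima]
    | none => pvSearch u ultima xs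

-- B's residue condition coincides with A's sum condition
theorem pvCond_residue (u : Int) (x y : List Int) :
    (PySem.Int.mod (pvHd y) 7 == PySem.Int.mod (PySem.Int.mod (5 - u) 7 - pvHd x) 7)
      = pvCond u x y := by
  unfold pvCond
  simp only [show ∀ a : Int, PySem.Int.mod a 7 = a % 7 from
    fun a => PySem.Int.mod_eq_emod_of_pos (by norm_num)]
  rw [Bool.eq_iff_iff]; simp only [beq_iff_eq]; omega

-- the dict nxt represents 'first matching residue' lookup over the processed suffix
def pvRep (nxt : PySem.Dict Int (List Int)) (ctx : List (List Int)) : Prop :=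
  ∀ r : Int, PySem.Dict.get? nxt r = ctx.find? (fun y => PySem.Int.mod (pvHd y) 7 == r)

-- the matches list the backward pass produces, indexed by the processing order
def pvMsRev (u : Int) : List (List Int) → List (List Int) → List (Option (List Int))
  | [], _ => []
  | x :: xs, ctx => ctx.find? (pvCond u x) :: pvMsRev u xs (x :: ctx)

theorem pvRep_empty : pvRep PySem.Dict.empty [] := by
  intro r; simp [PySem.Dict.get?_empty, List.find?]

theorem pvRep_insert (nxt : PySem.Dict Int (List Int)) (ctx : List (List Int)) (x : List Int)
    (h : pvRep nxt ctx) :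
    pvRep (PySem.Dict.insert nxt (PySem.Int.mod (pvHd x) 7) x) (x :: ctx) := by
  intro r
  rw [PySem.Dict.get?_insert, h r, List.find?_cons]
  by_cases hr : (PySem.Int.mod (pvHd x) 7 == r) = true
  · rw [hr, if_pos (beq_iff_eq.mp hr).symm]
  · rw [Bool.not_eq_true] at hr
    rw [hr, if_neg (fun e => (beq_eq_false_iff_ne.mp hr) e.symm)]

theorem pvBPass_spec (u : Int) :
    ∀ (l ctx : List (List Int)) (nxt : PySem.Dict Int (List Int))
      (ms : List (Option (List Int))), pvRep nxt ctx →
      (pvBPass (PySem.Int.mod (5 - u) 7) l nxt ms).2 = ms ++ pvMsRev u l ctx ∧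
      pvRep (pvBPass (PySem.Int.mod (5 - u) 7) l nxt ms).1 (l.reverse ++ ctx) := by
  intro l
  induction l with
  | nil => intro ctx nxt ms h; simpa [pvBPass, pvMsRev] using h
  | cons x xs ih =>
    intro ctx nxt ms h
    have hget : PySem.Dict.get? nxt (PySem.Int.mod (PySem.Int.mod (5 - u) 7 - pvHd x) 7)
        = ctx.find? (pvCond u x) := by
      rw [h]
      congr 1
      funext y
      exact pvCond_residue u x y
    have hrep := pvRep_insert nxt ctx x h
    have := ih (x :: ctx) (PySem.Dict.insert nxt (PySem.Int.mod (pvHd x) 7) x)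
      (ms ++ [ctx.find? (pvCond u x)]) hrep
    constructor
    · show (pvBPass _ xs _ _).2 = _
      rw [show (PySem.List.pyGet? x 0).getD 0 = pvHd x from rfl, hget, this.1]
      simp [pvMsRev]
    · show pvRep (pvBPass _ xs _ _).1 _
      rw [show (PySem.List.pyGet? x 0).getD 0 = pvHd x from rfl, hget]
      simpa using this.2

-- matches as aligned with body left-to-right (ctx [] at the top level)
def pvMsList (u : Int) : List (List Int) → List (Option (List Int))
  | [] => []
  | x :: xs => xs.find? (pvCond u x) :: pvMsList u xs

def pvMsListC (u : Int) : List (List Int) → List (List Int) → List (Option (List Int))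
  | [], _ => []
  | x :: xs, ctx => (xs ++ ctx).find? (pvCond u x) :: pvMsListC u xs ctx

theorem pvMsListC_append (u : Int) :
    ∀ (a : List (List Int)) (x : List Int) (ctx : List (List Int)),
      pvMsListC u (a ++ [x]) ctx = pvMsListC u a (x :: ctx) ++ [ctx.find? (pvCond u x)] := by
  intro a
  induction a with
  | nil => intro x ctx; simp [pvMsListC]
  | cons z zs ih => intro x ctx; simp [pvMsListC, ih, List.append_assoc]

theorem pvMsRev_eq (u : Int) :
    ∀ (l ctx : List (List Int)), pvMsRev u l ctx = (pvMsListC u l.reverse ctx).reverse := by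
  intro l
  induction l with
  | nil => intro ctx; simp [pvMsRev, pvMsListC]
  | cons x xs ih =>
    intro ctx
    simp only [pvMsRev, List.reverse_cons, pvMsListC_append, List.reverse_append,
      List.reverse_cons, List.reverse_nil, List.nil_append, List.singleton_append, ih]

theorem pvMsListC_nil (u : Int) : ∀ l : List (List Int), pvMsListC u l [] = pvMsList u l := by
  intro l
  induction l with
  | nil => rfl
  | cons x xs ih => simp [pvMsListC, pvMsList, ih]

theorem pvBScan_eq (u : Int) (ultima : List Int) :
    ∀ body : List (List Int),
      pvBScan ultima (body.zip (pvMsList u body)) =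
        (match pvSearch u ultima body with
         | some r => (r, true)
         | none => ([], false)) := by
  intro body
  induction body with
  | nil => rfl
  | cons x xs ih =>
    simp only [pvMsList, List.zip_cons_cons, pvSearch]
    cases h : xs.find? (pvCond u x) with
    | none => simpa [pvBScan] using ih
    | some y => simp [pvBScan]

-- B equals the reference search
theorem pvAlt_eq (lista : List (List Int)) (h : lista ≠ []) :
    suma3num_5_mod7_alt lista =
      (match pvSearch ((PySem.List.pyGet? (lista.getLast h) 0).getD 0) (lista.getLast h)
          lista.dropLast with
       | some r => (r, true)
       | none => ([], false)) := by
  unfold suma3num_5_mod7_alt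
  rw [PySem.List.pyGet?_neg_one, List.getLast?_eq_getLast_of_ne_nil h,
    PySem.List.slice_to_neg_one]
  simp only [Option.getD_some]
  set u : Int := (PySem.List.pyGet? (lista.getLast h) 0).getD 0 with hu
  have hp := (pvBPass_spec u lista.dropLast.reverse [] PySem.Dict.empty [] pvRep_empty).1
  rw [hp]
  simp only [List.nil_append]
  rw [pvMsRev_eq, List.reverse_reverse, List.reverse_reverse, pvMsListC_nil]
  exact pvBScan_eq u (lista.getLast h) lista.dropLast

-- ===== A side =====

theorem pvAInner_eq (lista : List (List Int)) (u : Int) (ultima : List Int)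
    (i : Nat) (hi : i < lista.dropLast.length) :
    ∀ (n k : Nat), lista.dropLast.length - k = n →
      pvAInner lista u ultima (i : Int)
          (PySem.List.pyRange (k : Int) (PySem.List.len lista - 1) 1) =
        ((lista.dropLast.drop k).find? (pvCond u (lista.dropLast[i]'hi))).map
          (fun y => [lista.dropLast[i]'hi, y, ultima]) := by
  have hL1 : 1 ≤ lista.length := by
    cases lista with
    | nil => simp at hi
    | cons a l => exact Nat.succ_le_succ (Nat.zero_le _)
  have hB : lista.dropLast.length = lista.length - 1 := List.length_dropLast
  have hL : (PySem.List.len lista - 1 : Int) = ((lista.dropLast.length : Nat) : Int) := by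
    simp [PySem.List.len_eq, hB]; omega
  intro n
  induction n with
  | zero =>
    intro k hk
    rw [hL, PySem.List.pyRange_one_eq_nil (by exact_mod_cast (by omega : lista.dropLast.length ≤ k))]
    rw [List.drop_eq_nil_of_le (by omega)]
    simp [pvAInner]
  | succ n ih =>
    intro k hk
    have hkB : k < lista.dropLast.length := by omega
    have hkL : k < lista.length := by omega
    have hiL : i < lista.length := by omega
    rw [hL, PySem.List.pyRange_one_cons (by exact_mod_cast hkB)]
    rw [pvAInner]
    have hprim : (PySem.List.pyGet? lista (i : Int)).getD [] = lista.dropLast[i]'hi := by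
      rw [PySem.List.pyGet?_natCast, List.getElem?_eq_getElem hiL]
      simp [List.getElem_dropLast]
    have hseg : (PySem.List.pyGet? lista (k : Int)).getD [] = lista.dropLast[k]'hkB := by
      rw [PySem.List.pyGet?_natCast, List.getElem?_eq_getElem hkL]
      simp [List.getElem_dropLast]
    rw [List.drop_eq_getElem_cons hkB, List.find?_cons]
    simp only [hprim, hseg]
    have hcnd : (PySem.Int.mod ((PySem.List.pyGet? (lista.dropLast[i]'hi) 0).getD 0 +
        (PySem.List.pyGet? (lista.dropLast[k]'hkB) 0).getD 0 + u) 7 == 5) =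
        pvCond u (lista.dropLast[i]'hi) (lista.dropLast[k]'hkB) := rfl
    rw [hcnd]
    cases hc : pvCond u (lista.dropLast[i]'hi) (lista.dropLast[k]'hkB) with
    | true => simp
    | false =>
      have ihk := ih (k + 1) (by omega)
      rw [hL] at ihk
      rw [show ((k : Int) + 1) = ((k + 1 : Nat) : Int) from by push_cast; ring]
      simp only [Bool.false_eq_true, if_false]
      exact ihk

theorem pvAOuter_eq (lista : List (List Int)) (u : Int) (ultima : List Int)
    (h : lista ≠ []) :
    ∀ (n k : Nat), lista.dropLast.length - k = n →
      pvAOuter lista u ultima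
          (PySem.List.pyRange (k : Int) (PySem.List.len lista - 1) 1) =
        pvSearch u ultima (lista.dropLast.drop k) := by
  have hL1 : 1 ≤ lista.length := List.length_pos_of_ne_nil h
  have hB : lista.dropLast.length = lista.length - 1 := List.length_dropLast
  have hL : (PySem.List.len lista - 1 : Int) = ((lista.dropLast.length : Nat) : Int) := by
    simp [PySem.List.len_eq, hB]; omega
  intro n
  induction n with
  | zero =>
    intro k hk
    rw [hL, PySem.List.pyRange_one_eq_nil (by exact_mod_cast (by omega : lista.dropLast.length ≤ k))]
    rw [List.drop_eq_nil_of_le (by omega)]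
    simp [pvAOuter, pvSearch]
  | succ n ih =>
    intro k hk
    have hkB : k < lista.dropLast.length := by omega
    rw [hL, PySem.List.pyRange_one_cons (by exact_mod_cast hkB)]
    rw [pvAOuter]
    have hin := pvAInner_eq lista u ultima k hkB (lista.dropLast.length - (k + 1)) (k + 1) rfl
    rw [show ((k : Int) + 1) = ((k + 1 : Nat) : Int) from by push_cast; ring, hin]
    rw [List.drop_eq_getElem_cons hkB, pvSearch]
    cases hf : (lista.dropLast.drop (k + 1)).find? (pvCond u (lista.dropLast[k]'hkB)) with
    | some y => simp
    | none =>
      simp only [Option.map_none]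
      have ihk := ih (k + 1) (by omega)
      rw [hL] at ihk
      exact ihk

theorem pvA_eq (lista : List (List Int)) (h : lista ≠ []) :
    suma3num_5_mod7 lista =
      (match pvSearch ((PySem.List.pyGet? (lista.getLast h) 0).getD 0) (lista.getLast h)
          lista.dropLast with
       | some r => (r, true)
       | none => ([], false)) := by
  have hL1 : 1 ≤ lista.length := List.length_pos_of_ne_nil h
  have hlast : (PySem.List.pyGet? lista (PySem.List.len lista - 1)).getD [] = lista.getLast h := by
    rw [show (PySem.List.len lista - 1 : Int) = ((lista.length - 1 : Nat) : Int) from by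
      simp [PySem.List.len_eq]; omega]
    rw [PySem.List.pyGet?_natCast, List.getElem?_eq_getElem (by omega)]
    simp [List.getLast_eq_getElem]
  unfold suma3num_5_mod7
  simp only [hlast]
  have ho := pvAOuter_eq lista ((PySem.List.pyGet? (lista.getLast h) 0).getD 0)
    (lista.getLast h) h lista.dropLast.length 0 (by omega)
  rw [Nat.cast_zero, List.drop_zero] at ho
  rw [ho]

-- ===== VERDICT (by name: the statement is the Claim_ definition above) =====
theorem suma3num_5_mod7_spec : Claim_equal_suma3num_5_mod7 := by
  intro lista _ hpre
  obtain ⟨h, hne⟩ := hpre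
  unfold Spec_suma3num_5_mod7
  rw [pvA_eq lista h, pvAlt_eq lista h]
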